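-- pv_equiv track=rewrite | github.com/t0r1n88/Lachesis | cyberpsychology/kochetkov_dga.py | calc_value_ip
-- ===== SOURCE A (Python) =====
-- def calc_value_ip(row):
--     """
--     Функция для подсчета значения
--     :return: число
--     """
--     lst_pr = [10,11,17,19,21]
--     value_forward = 0  # результат
--     for idx, value in enumerate(row,1):
--         if idx in lst_pr:
--             if value == 1:
--                 value_forward += 5
--             elif value == 2:
--                 value_forward += 4
--             elif value == 3:
--                 value_forward += 3
--             elif value == 4:
--                 value_forward += 2
--             else:
--                 value_forward += 1
--         else:
--             value_forward += value
--
--     return value_forward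
-- ===== SOURCE B (Python) =====
-- def calc_value_ip(row):
--     total = sum(row)
--     for pos in (10, 11, 17, 19, 21):
--         i = pos - 1
--         if i < len(row):
--             v = row[i]
--             new = 6 - v if v in (1, 2, 3, 4) else 1
--             total += new - v
--     return total
-- ===== Notes on version B (the rewrite author's own statement) =====
-- stated objective: simpler
-- what changed: Instead of a per-element branch inside an enumerate loop, B sums the whole row once and then applies a constant correction loop over the five fixed 1-based special positions (10,11,17,19,21), replacing each in-range value v by 6-v (for v in 1..4) or 1.
import Mathlib
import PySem

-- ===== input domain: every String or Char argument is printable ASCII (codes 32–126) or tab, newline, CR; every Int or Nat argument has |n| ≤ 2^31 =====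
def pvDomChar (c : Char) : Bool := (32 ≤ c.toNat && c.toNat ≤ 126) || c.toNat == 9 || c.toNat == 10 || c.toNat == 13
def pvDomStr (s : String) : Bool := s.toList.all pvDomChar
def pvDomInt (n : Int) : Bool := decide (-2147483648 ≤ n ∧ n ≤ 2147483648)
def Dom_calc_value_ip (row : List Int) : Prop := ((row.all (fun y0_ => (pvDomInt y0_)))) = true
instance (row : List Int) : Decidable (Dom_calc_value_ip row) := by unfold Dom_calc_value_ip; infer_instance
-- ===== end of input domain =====

-- B replaces A's per-element branch in an enumerate loop by one full sum plus a
-- constant correction loop over the five fixed special positions (simpler decomposition).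


-- ===== PORT A =====
-- A's transform for a value at a special position (the elif chain)
def pvAf (v : Int) : Int :=
  if v = 1 then 5 else if v = 2 then 4 else if v = 3 then 3 else if v = 4 then 2 else 1

-- the enumerate(row,1) loop, carrying idx and the accumulator value_forward
def pvAGo (row : List Int) (idx : Int) (acc : Int) : Int :=
  match row with
  | [] => acc
  | v :: rest =>
      pvAGo rest (idx + 1)
        (acc + (if idx ∈ ([10, 11, 17, 19, 21] : List Int) then pvAf v else v))

def calc_value_ip (row : List Int) : Int := pvAGo row 1 0

-- ===== PORT B =====
-- B's replacement value: 6-v for v in (1,2,3,4), else 1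
def pvBNew (v : Int) : Int := if v = 1 ∨ v = 2 ∨ v = 3 ∨ v = 4 then 6 - v else 1

-- one iteration of B's correction loop over a special 1-based position
def pvBStep (row : List Int) (total pos : Int) : Int :=
  let i := (pos - 1).toNat
  if i < row.length then total + (pvBNew (row.getD i 0) - row.getD i 0) else total

def calc_value_ip_alt (row : List Int) : Int :=
  ([10, 11, 17, 19, 21] : List Int).foldl (pvBStep row) row.sum

-- ===== PRECONDITION & SPEC =====
def Spec_calc_value_ip (row : List Int) (out : Int) : Prop := out = calc_value_ip_alt row
instance (row : List Int) (out : Int) : Decidable (Spec_calc_value_ip row out) := by unfold Spec_calc_value_ip; infer_instance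

-- ===== CLAIM (what is proved, stated in full; the proofs are below) =====
def Claim_equal_calc_value_ip : Prop := ∀ (row : List Int), Dom_calc_value_ip row → Spec_calc_value_ip row (calc_value_ip row)

-- ===== LEMMAS AND PROOFS =====

-- contribution of the tail of the loop starting at 1-based index idx
def pvContrib (row : List Int) (idx : Int) : Int :=
  match row with
  | [] => 0
  | v :: rest =>
      (if idx ∈ ([10, 11, 17, 19, 21] : List Int) then pvAf v else v) + pvContrib rest (idx + 1)

theorem pvAGo_eq (row : List Int) : ∀ (idx acc : Int),
    pvAGo row idx acc = acc + pvContrib row idx := by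
  induction row with
  | nil => intro idx acc; simp [pvAGo, pvContrib]
  | cons v rest ih => intro idx acc; simp [pvAGo, pvContrib, ih]; ring

-- correction term for one special position p, seen from start index idx
def pvCorrOne (row : List Int) (idx p : Int) : Int :=
  if idx ≤ p ∧ (p - idx).toNat < row.length then
    pvAf (row.getD (p - idx).toNat 0) - row.getD (p - idx).toNat 0
  else 0

def pvCorr (row : List Int) (idx : Int) : Int :=
  pvCorrOne row idx 10 + pvCorrOne row idx 11 + pvCorrOne row idx 17 +
    pvCorrOne row idx 19 + pvCorrOne row idx 21

theorem pvCorrOne_cons (v : Int) (r : List Int) (idx p : Int) :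
    pvCorrOne (v :: r) idx p
      = pvCorrOne r (idx + 1) p + (if p = idx then pvAf v - v else 0) := by
  unfold pvCorrOne
  by_cases h1 : idx ≤ p
  · by_cases h2 : p = idx
    · subst h2
      have hn : ¬ ((p : Int) + 1 ≤ p) := by omega
      simp [hn]
    · have hlt : idx + 1 ≤ p := by omega
      have hn : (p - idx).toNat = (p - (idx + 1)).toNat + 1 := by omega
      simp only [hn, List.getD_cons_succ, List.length_cons, h1, hlt, true_and,
        if_neg h2, add_zero]
      have : (p - (idx + 1)).toNat + 1 < r.length + 1 ↔ (p - (idx + 1)).toNat < r.length := by omega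
      simp [this]
  · have h2 : ¬ idx + 1 ≤ p := by omega
    have h3 : p ≠ idx := by omega
    simp [h1, h2, h3]

theorem pvContrib_eq (row : List Int) : ∀ (idx : Int),
    pvContrib row idx = row.sum + pvCorr row idx := by
  induction row with
  | nil => intro idx; simp [pvContrib, pvCorr, pvCorrOne]
  | cons v rest ih =>
      intro idx
      simp only [pvContrib, ih, List.sum_cons, pvCorr, pvCorrOne_cons]
      by_cases h : idx ∈ ([10, 11, 17, 19, 21] : List Int)
      · simp only [if_pos h]
        fin_cases h <;> simp <;> ring
      · simp only [if_neg h]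
        simp only [List.mem_cons, List.not_mem_nil] at h
        simp only [not_or] at h
        obtain ⟨h10, h11, h17, h19, h21⟩ := h
        have e10 : ¬ (10 : Int) = idx := by omega
        have e11 : ¬ (11 : Int) = idx := by omega
        have e17 : ¬ (17 : Int) = idx := by omega
        have e19 : ¬ (19 : Int) = idx := by omega
        have e21 : ¬ (21 : Int) = idx := by omega
        simp [e10, e11, e17, e19, e21]; ring

theorem pvBNew_eq_pvAf (v : Int) : pvBNew v = pvAf v := by
  unfold pvBNew pvAf; split_ifs <;> omega

theorem pvBStep_eq (row : List Int) (t p : Int) (hp : 1 ≤ p) :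
    pvBStep row t p = t + pvCorrOne row 1 p := by
  unfold pvBStep pvCorrOne
  simp only [pvBNew_eq_pvAf]
  split_ifs with h1 h2 h3 <;> first | rfl | omega

-- ===== VERDICT (by name: the statement is the Claim_ definition above) =====
theorem calc_value_ip_spec : Claim_equal_calc_value_ip := by
  intro row _
  unfold Spec_calc_value_ip calc_value_ip calc_value_ip_alt
  rw [pvAGo_eq, pvContrib_eq]
  simp only [List.foldl_cons, List.foldl_nil]
  rw [pvBStep_eq row _ 10 (by norm_num), pvBStep_eq row _ 11 (by norm_num),
    pvBStep_eq row _ 17 (by norm_num), pvBStep_eq row _ 19 (by norm_num),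
    pvBStep_eq row _ 21 (by norm_num)]
  unfold pvCorr
  ring
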